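-- pv_equiv track=rewrite | github.com/gpiat/BELT | medmentions.py | split_punctuation
-- ===== SOURCE A (Python) =====
-- import string
--
-- def split_punctuation(text):
--     """ Args:
--             list<str>
--         Return:
--             list<str>
--         ex:
--         in:  ['hello,', 'how', 'do', 'you', 'do?']
--         out: ['hello', ',', 'how', 'do', 'you', 'do', '?']
--     """
--     new_text = []
--     for word in text:
--         new_word = ''
--         for char in word:
--             if char not in string.punctuation:
--                 new_word += char
--             else:
--                 new_text.append(new_word)
--                 new_word = char
--         new_text.append(new_word)
--     return new_text
-- ===== SOURCE B (Python) =====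
-- import string
--
-- def split_punctuation(text):
--     # Span-based tokenizer: the first token of a word is its longest
--     # punctuation-free prefix; each further token is one punctuation char
--     # followed by the next punctuation-free run.
--     punct = set(string.punctuation)
--     out = []
--     for word in text:
--         k = 0
--         while k < len(word) and word[k] not in punct:
--             k += 1
--         out.append(word[:k])
--         rest = word[k:]
--         while rest:
--             j = 1
--             while j < len(rest) and rest[j] not in punct:
--                 j += 1
--             out.append(rest[:j])
--             rest = rest[j:]
--     return out
-- ===== Notes on version B (the rewrite author's own statement) =====
-- stated objective: alternative
-- what changed: Instead of A's char-by-char scan with a flush-on-punctuation string accumulator, B tokenizes each word by spans: it slices off the longest punctuation-free prefix, then repeatedly slices one punctuation char plus the following punctuation-free run.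
import Mathlib
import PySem

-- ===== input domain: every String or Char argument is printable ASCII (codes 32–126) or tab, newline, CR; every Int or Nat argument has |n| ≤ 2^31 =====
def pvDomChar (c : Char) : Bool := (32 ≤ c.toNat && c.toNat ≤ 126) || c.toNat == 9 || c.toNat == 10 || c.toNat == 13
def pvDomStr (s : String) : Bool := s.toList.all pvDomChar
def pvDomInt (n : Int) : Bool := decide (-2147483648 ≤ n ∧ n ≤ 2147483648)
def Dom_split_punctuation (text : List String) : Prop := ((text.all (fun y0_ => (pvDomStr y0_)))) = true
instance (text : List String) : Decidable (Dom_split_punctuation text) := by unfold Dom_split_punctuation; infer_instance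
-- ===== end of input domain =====

-- B replaces A's flush-on-punctuation accumulator scan by span-based slicing; same return value.

-- string.punctuation (shared constant)
def pyPunct : List Char := "!\"#$%&'()*+,-./:;<=>?@[\\]^_`{|}~".toList

-- ===== PORT A =====
-- A's inner loop: state (new_text, new_word); extend new_word on non-punct, flush on punct
def spA_step (s : List String × List Char) (c : Char) : List String × List Char :=
  if ¬ pyPunct.contains c then (s.1, s.2 ++ [c])
  else (s.1 ++ [String.ofList s.2], [c])

def split_punctuation (text : List String) : List String :=
  text.foldl (fun new_text word =>
    let s := word.toList.foldl spA_step (new_text, [])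
    s.1 ++ [String.ofList s.2]) []

-- ===== PORT B =====
def notPunct (c : Char) : Bool := !(pyPunct.contains c)

-- B's outer while loop: rest starts with a punctuation char; take it plus the
-- following punctuation-free run (rest[:j]), recurse on rest[j:]
def bGroups : List Char → List (List Char)
  | [] => []
  | c :: rest => (c :: rest.takeWhile notPunct) :: bGroups (rest.dropWhile notPunct)
termination_by l => l.length
decreasing_by
  simpa using Nat.lt_succ_of_le (List.length_dropWhile_le notPunct rest)

def split_punctuation_alt (text : List String) : List String :=
  text.flatMap (fun word =>
    let cs := word.toList
    -- word[:k] / word[k:] with k the length of the punctuation-free prefix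
    String.ofList (cs.takeWhile notPunct) :: (bGroups (cs.dropWhile notPunct)).map String.ofList)

-- ===== PRECONDITION & SPEC =====
def Spec_split_punctuation (text : List String) (out : List String) : Prop := out = split_punctuation_alt text
instance (text : List String) (out : List String) : Decidable (Spec_split_punctuation text out) := by unfold Spec_split_punctuation; infer_instance

-- ===== CLAIM (what is proved, stated in full; the proofs are below) =====
def Claim_equal_split_punctuation : Prop := ∀ (text : List String), Dom_split_punctuation text → Spec_split_punctuation text (split_punctuation text)

-- ===== LEMMAS AND PROOFS =====

-- Tokens of one word as A produces them: (head group, remaining groups),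
-- where each punctuation char starts a new group.
def groupsOf : List Char → List Char × List (List Char)
  | [] => ([], [])
  | c :: rest =>
    let p := groupsOf rest
    if pyPunct.contains c then ([], (c :: p.1) :: p.2) else (c :: p.1, p.2)

lemma A_inner (w : List Char) : ∀ (acc : List String) (cur : List Char),
    (let s := w.foldl spA_step (acc, cur); s.1 ++ [String.ofList s.2]) =
    acc ++ String.ofList (cur ++ (groupsOf w).1) :: ((groupsOf w).2.map String.ofList) := by
  induction w with
  | nil => intro acc cur; simp [groupsOf]
  | cons c rest ih =>
    intro acc cur
    by_cases h : c ∈ pyPunct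
    · simp only [List.foldl_cons]
      rw [show spA_step (acc, cur) c = (acc ++ [String.ofList cur], [c]) from by simp [spA_step, h]]
      rw [ih]; simp [groupsOf, h]
    · simp only [List.foldl_cons]
      rw [show spA_step (acc, cur) c = (acc, cur ++ [c]) from by simp [spA_step, h]]
      rw [ih]; simp [groupsOf, h]

lemma groupsOf_fst (w : List Char) : (groupsOf w).1 = w.takeWhile notPunct := by
  induction w with
  | nil => simp [groupsOf]
  | cons c rest ih =>
    by_cases h : c ∈ pyPunct <;>
      simp [groupsOf, List.takeWhile, notPunct, h, ih]

lemma groupsOf_snd (w : List Char) : (groupsOf w).2 = bGroups (w.dropWhile notPunct) := by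
  induction w with
  | nil => simp [groupsOf, bGroups]
  | cons c rest ih =>
    by_cases h : c ∈ pyPunct
    · simp [groupsOf, List.dropWhile, notPunct, h, bGroups, groupsOf_fst, ih]
    · simp [groupsOf, List.dropWhile, notPunct, h, ih]

lemma word_tokens_eq (acc : List String) (w : List Char) :
    (let s := w.foldl spA_step (acc, []); s.1 ++ [String.ofList s.2]) =
    acc ++ (String.ofList (w.takeWhile notPunct) :: (bGroups (w.dropWhile notPunct)).map String.ofList) := by
  rw [A_inner, groupsOf_fst, groupsOf_snd]
  simp

theorem split_punctuation_eq (text : List String) :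
    split_punctuation text = split_punctuation_alt text := by
  unfold split_punctuation split_punctuation_alt
  induction text using List.reverseRecOn with
  | nil => rfl
  | append_singleton rest w ih =>
    rw [List.foldl_append, List.flatMap_append, ← ih]
    simp only [List.foldl_cons, List.foldl_nil, List.flatMap_cons, List.flatMap_nil,
      List.append_nil]
    exact word_tokens_eq _ w.toList

-- ===== VERDICT (by name: the statement is the Claim_ definition above) =====
theorem split_punctuation_spec : Claim_equal_split_punctuation := by
  intro text _
  unfold Spec_split_punctuation
  exact split_punctuation_eq text
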